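-- pv_equiv track=rewrite | github.com/kharyal/leetcode | largest_coprime_divisor/largest_coprime_divisor.py | cpFact
-- ===== SOURCE A (Python) =====
-- def cpFact(A, B):
--     arr = [1]*(A+1)
--     ret1 = []
--     ret1_num = []
--     for i in range(2,len(arr)):
--         if arr[i]==1:
--             j = 2
--             while i*j<=A:
--                 arr[i*j] = 0
--                 j = j+1
--             if A%i == 0:
--                 ret1.append(i)
--                 ret1_num.append(0)
--             temp = A
--             while temp%i==0:
--                 ret1_num[-1] = ret1_num[-1]+1
--                 temp = temp//i
--
--
--     arr = [1]*(B+1)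
--     ret2 = []
--     for i in range(2,len(arr)):
--         if arr[i]==1:
--             j = 2
--             while i*j<=B:
--                 arr[i*j] = 0
--                 j = j+1
--             if B%i == 0:
--                 ret2.append(i)
--             temp = B
--             while temp%i==0:
--                 temp = temp//i
--
--     ret = 1
--
--     for i,num1 in enumerate(ret1):
--         if not num1 in ret2:
--             ret = ret*(num1**ret1_num[i])
--
--     return ret
-- ===== SOURCE B (Python) =====
-- def _gcd(a, b):
--     while b:
--         a, b = b, a % b
--     return a
--
--
-- def cpFact(A, B):
--     # Repeatedly divide A by gcd(A, B) until they are coprime.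
--     if A <= 1:
--         return 1
--     b = -B if B < 0 else B
--     while True:
--         g = _gcd(A, b)
--         if g == 1:
--             return A
--         A //= g
-- ===== Notes on version B (the rewrite author's own statement) =====
-- stated objective: faster
-- what changed: Replaces the two full Sieve-of-Eratosthenes factorizations of A and B by repeatedly dividing A by gcd(A,B) until the gcd is 1, which strips exactly the prime factors shared with B.
-- outside the precondition, e.g. on cpFact(12, 0): A returns 12, B returns 1; on cpFact(12, -4): A returns 12, B returns 3
import Mathlib
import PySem

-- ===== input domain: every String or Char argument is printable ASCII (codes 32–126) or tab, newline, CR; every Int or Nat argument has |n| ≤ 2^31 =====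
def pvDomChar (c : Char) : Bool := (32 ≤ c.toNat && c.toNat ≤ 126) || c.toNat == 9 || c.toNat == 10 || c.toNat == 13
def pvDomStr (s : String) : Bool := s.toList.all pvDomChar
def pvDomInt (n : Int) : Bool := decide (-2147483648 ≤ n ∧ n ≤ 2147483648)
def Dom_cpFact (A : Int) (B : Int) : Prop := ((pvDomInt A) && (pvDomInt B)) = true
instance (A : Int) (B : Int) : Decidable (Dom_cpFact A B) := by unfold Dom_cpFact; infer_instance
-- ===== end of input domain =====

-- B replaces A's two prime sieves by repeated division of A by gcd(A, B); equivalence proved for B ≥ 1 (or A ≤ 1).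


-- ===== PORT A =====
-- inner while loop `while i*j<=A: arr[i*j]=0; j=j+1` (the 0 < p guard only makes the recursion total; A calls it with p ≥ 2)
def markMuls (p : Nat) (j : Nat) (n : Nat) (arr : Array Nat) : Array Nat :=
  if h : 0 < p ∧ p * j ≤ n then markMuls p (j + 1) n (arr.setIfInBounds (p * j) 0) else arr
  termination_by n + 1 - p * j
  decreasing_by
    have hpj : p * (j + 1) = p * j + p := by ring
    omega

-- `ret1_num[-1] = ret1_num[-1] + 1` (the empty case is unreachable in A)
def incLast : List Nat → List Nat
  | [] => []
  | [x] => [x + 1]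
  | x :: y :: xs => x :: incLast (y :: xs)

-- inner while loop `while temp%i==0: ret1_num[-1] += 1; temp //= i` (guards 1 < p, 0 < temp only for totality)
def countLoop (temp : Nat) (p : Nat) (num : List Nat) : List Nat :=
  if h : temp % p = 0 ∧ 1 < p ∧ 0 < temp then countLoop (temp / p) p (incLast num) else num
  termination_by temp
  decreasing_by exact Nat.div_lt_self h.2.2 h.2.1

-- inner while loop `while temp%i==0: temp //= i` of the second sieve (its result is discarded, as in A)
def divOut (temp : Nat) (p : Nat) : Nat :=
  if h : temp % p = 0 ∧ 1 < p ∧ 0 < temp then divOut (temp / p) p else temp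
  termination_by temp
  decreasing_by exact Nat.div_lt_self h.2.2 h.2.1

-- first `for i in range(2, len(arr))` loop of A: sieve + collect prime divisors of n with multiplicities
def sieveA (L : Nat) (i : Nat) (n : Nat) (arr : Array Nat) (ret1 : List Nat) (num1 : List Nat) :
    List Nat × List Nat :=
  if _h : i < L then
    if arr.getD i 0 = 1 then
      let arr' := markMuls i 2 n arr
      if n % i = 0 then
        sieveA L (i + 1) n arr' (ret1 ++ [i]) (countLoop n i (num1 ++ [0]))
      else
        sieveA L (i + 1) n arr' ret1 (countLoop n i num1)
    else sieveA L (i + 1) n arr ret1 num1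
  else (ret1, num1)
  termination_by L - i

-- second `for i in range(2, len(arr))` loop of A: sieve + collect prime divisors of n
def sieveB (L : Nat) (i : Nat) (n : Nat) (arr : Array Nat) (ret2 : List Nat) : List Nat :=
  if _h : i < L then
    if arr.getD i 0 = 1 then
      let arr' := markMuls i 2 n arr
      let _t := divOut n i
      if n % i = 0 then sieveB L (i + 1) n arr' (ret2 ++ [i]) else sieveB L (i + 1) n arr' ret2
    else sieveB L (i + 1) n arr ret2
  else ret2
  termination_by L - i

def cpFact (A : Int) (B : Int) : Int :=
  let arrA : Array Nat := Array.replicate ((A + 1).toNat) 1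
  let r1 := sieveA arrA.size 2 A.toNat arrA [] []
  let arrB : Array Nat := Array.replicate ((B + 1).toNat) 1
  let ret2 := sieveB arrB.size 2 B.toNat arrB []
  ((PySem.List.enumerate r1.1 0).foldl
    (fun ret ip => if ip.2 ∈ ret2 then ret else ret * ip.2 ^ PySem.List.pyGetD r1.2 ip.1 0) 1 : Nat)

-- ===== PORT B =====
-- Euclid's algorithm: `while b: a, b = b, a % b; return a`
def gcdW (a : Int) (b : Int) : Int :=
  if h : b ≠ 0 then gcdW b (PySem.Int.mod a b) else a
  termination_by b.natAbs
  decreasing_by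
    rcases lt_or_gt_of_ne h with hb | hb
    · have h1 := PySem.Int.mod_neg_bounds (a := a) hb; omega
    · have h1 := PySem.Int.mod_nonneg (a := a) hb
      have h2 := PySem.Int.mod_lt (a := a) hb; omega

-- `while True: g = gcd(A, b); if g == 1: return A; A //= g` (the dead else-branch only makes the recursion total)
def altLoop (a : Int) (b : Int) : Int :=
  let g := gcdW a b
  if g = 1 then a
  else if h : 1 < g ∧ g ≤ a then altLoop (PySem.Int.floordiv a g) b
  else a
  termination_by a.toNat
  decreasing_by
    have hg : g = gcdW a b := rfl
    rw [PySem.Int.floordiv_eq_ediv_of_pos (by omega), ← hg]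
    have h2 : a / g < a := by
      apply Int.ediv_lt_of_lt_mul (by omega)
      nlinarith [h.1, h.2]
    have h3 : 0 ≤ a / g := Int.ediv_nonneg (by omega) (by omega)
    omega

def cpFact_alt (A : Int) (B : Int) : Int :=
  if A ≤ 1 then 1
  else altLoop A (if B < 0 then -B else B)

-- ===== PRECONDITION & SPEC =====
-- Pre_ excludes B ≤ 0 with A ≥ 2: non-positive B is outside the task's natural domain (positive
-- integers), and there A's second sieve runs over an empty/one-cell list, so A returns the full
-- prime-power product of A while B strips the factors A shares with |B| (or all of them for B = 0).
def Pre_cpFact (A : Int) (B : Int) : Prop := 1 ≤ B ∨ A ≤ 1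
instance (A : Int) (B : Int) : Decidable (Pre_cpFact A B) := by unfold Pre_cpFact; infer_instance
def pvWitness_cpFact : Int × Int := (12, 18)

def Spec_cpFact (A : Int) (B : Int) (out : Int) : Prop := out = cpFact_alt A B
instance (A : Int) (B : Int) (out : Int) : Decidable (Spec_cpFact A B out) := by unfold Spec_cpFact; infer_instance

-- ===== CLAIM (what is proved, stated in full; the proofs are below) =====
def Claim_equal_cpFact : Prop := ∀ (A : Int) (B : Int), Dom_cpFact A B → Pre_cpFact A B → Spec_cpFact A B (cpFact A B)

-- ===== LEMMAS AND PROOFS =====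

-- common value both programs compute: the largest divisor of a coprime to b
def coprimePart (a : Nat) (b : Nat) : Nat :=
  ∏ p ∈ a.primeFactors \ b.primeFactors, p ^ a.factorization p

-- the ordered list of primes in [i, n] dividing n
def sListR (n : Nat) (i : Nat) : List Nat :=
  if i ≤ n then (if Nat.Prime i ∧ i ∣ n then [i] else []) ++ sListR n (i + 1) else []
  termination_by n + 1 - i

-- sieve invariant before processing index i
def SInv (n : Nat) (arr : Array Nat) (i : Nat) : Prop :=
  arr.size = n + 1 ∧
    ∀ k, 2 ≤ k → k ≤ n → (arr.getD k 0 = 1 ↔ (Nat.Prime k ∨ i ≤ Nat.minFac k))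



-- ---- small list helpers ----
theorem arrGetD_eq (a : Array Nat) (k d : Nat) : a.getD k d = a[k]?.getD d := by
  by_cases h : k < a.size <;>
    simp [Array.getD, h, Array.getElem?_eq_getElem, Array.getElem?_eq_none_iff.mpr]

theorem arrGetD_setIfInBounds (a : Array Nat) (i k v d : Nat) :
    (a.setIfInBounds i v).getD k d = if i = k ∧ i < a.size then v else a.getD k d := by
  rw [arrGetD_eq, arrGetD_eq, Array.getElem?_setIfInBounds]
  by_cases h1 : i = k
  · subst h1; by_cases h2 : i < a.size <;> simp [h2]
  · simp [h1]

theorem arrGetD_replicate (n i v d : Nat) (h : i < n) : (Array.replicate n v).getD i d = v := by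
  simp [Array.getD, h]

theorem incLast_append_singleton (l : List Nat) (c : Nat) : incLast (l ++ [c]) = l ++ [c + 1] := by
  induction l with
  | nil => rfl
  | cons x xs ih =>
    cases xs with
    | nil => rfl
    | cons y t => simpa [incLast] using ih

theorem countLoop_not_dvd (temp p : Nat) (num : List Nat) (h : temp % p ≠ 0) :
    countLoop temp p num = num := by
  rw [countLoop]; simp [h]

theorem countLoop_append (p : Nat) (hp : Nat.Prime p) :
    ∀ temp, 0 < temp → ∀ (num : List Nat) (c : Nat),
      countLoop temp p (num ++ [c]) = num ++ [c + temp.factorization p] := by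
  intro temp
  induction temp using Nat.strong_induction_on with
  | _ temp ih =>
    intro ht num c
    by_cases hd : temp % p = 0
    · rw [countLoop, dif_pos ⟨hd, hp.one_lt, ht⟩, incLast_append_singleton]
      have hdvd : p ∣ temp := Nat.dvd_of_mod_eq_zero hd
      have hq : 0 < temp / p := Nat.div_pos (Nat.le_of_dvd ht hdvd) hp.pos
      rw [ih (temp / p) (Nat.div_lt_self ht hp.one_lt) hq]
      have he : temp = p * (temp / p) := (Nat.mul_div_cancel' hdvd).symm
      have hfac : temp.factorization p = (temp / p).factorization p + 1 := by
        conv_lhs => rw [he]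
        rw [Nat.factorization_mul hp.ne_zero (by omega)]
        simp [hp.factorization_self]
        omega
      rw [hfac]
      congr 2
      omega
    · rw [countLoop, dif_neg (by tauto)]
      have hnd : ¬ p ∣ temp := fun hdd => hd (Nat.mod_eq_zero_of_dvd hdd)
      rw [Nat.factorization_eq_zero_of_not_dvd hnd]
      simp

-- ---- marking loop ----
theorem markMuls_size (p j n : Nat) (arr : Array Nat) :
    (markMuls p j n arr).size = arr.size := by
  fun_induction markMuls p j n arr <;> simp_all

theorem markMuls_getD (p : Nat) (hp : 0 < p) :
    ∀ j (arr : Array Nat), n < arr.size → ∀ k,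
      (markMuls p j n arr).getD k 0 =
        if p ∣ k ∧ p * j ≤ k ∧ k ≤ n then 0 else arr.getD k 0 := by
  suffices main : ∀ M j (arr : Array Nat), n + 1 - p * j ≤ M → n < arr.size → ∀ k,
      (markMuls p j n arr).getD k 0 =
        if p ∣ k ∧ p * j ≤ k ∧ k ≤ n then 0 else arr.getD k 0 by
    intro j arr hlen k
    exact main (n + 1 - p * j) j arr (le_refl _) hlen k
  intro M
  induction M with
  | zero =>
    intro j arr hM hlen k
    rw [markMuls, dif_neg (by omega)]
    rw [if_neg (by rintro ⟨_, h2, h3⟩; omega)]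
  | succ M ihM =>
    intro j arr hM hlen k
    by_cases hc : 0 < p ∧ p * j ≤ n
    · rw [markMuls, dif_pos hc]
      have hpj1 : p * (j + 1) = p * j + p := by ring
      rw [ihM (j + 1) (arr.setIfInBounds (p * j) 0) (by omega)
        (by simpa [Array.size_setIfInBounds] using hlen) k]
      by_cases hk : k = p * j
      · subst hk
        have hset : ((arr.setIfInBounds (p * j) 0).getD (p * j) 0) = 0 := by
          rw [arrGetD_setIfInBounds]
          simp [show p * j < arr.size by omega]
        conv_rhs => rw [if_pos ⟨dvd_mul_right p j, le_refl _, hc.2⟩]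
        split_ifs with hsp
        · rfl
        · exact hset
      · have hset : ((arr.setIfInBounds (p * j) 0).getD k 0) = arr.getD k 0 := by
          rw [arrGetD_setIfInBounds, if_neg (fun hcc => hk hcc.1.symm)]
        by_cases hcond : p ∣ k ∧ p * j ≤ k ∧ k ≤ n
        · obtain ⟨⟨m, rfl⟩, hle, hkn⟩ := hcond
          have hjm : j ≤ m := Nat.le_of_mul_le_mul_left hle hc.1
          have hm : j + 1 ≤ m := by
            rcases Nat.eq_or_lt_of_le hjm with rfl | h
            · exact absurd rfl hk
            · omega
          rw [if_pos ⟨dvd_mul_right p m, Nat.mul_le_mul_left p hm, hkn⟩,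
            if_pos ⟨dvd_mul_right p m, hle, hkn⟩]
        · rw [if_neg hcond, if_neg (by
            rintro ⟨hd, hle, hkn⟩
            exact hcond ⟨hd, by omega, hkn⟩), hset]
    · rw [markMuls, dif_neg hc]
      by_cases hcond : p ∣ k ∧ p * j ≤ k ∧ k ≤ n
      · exact absurd ⟨hp, by omega⟩ hc
      · rw [if_neg hcond]

-- ---- invariant steps ----
theorem composite_minFac_lt {i : Nat} (h2 : 2 ≤ i) (h : ¬ Nat.Prime i) : i.minFac < i := by
  have hp := Nat.minFac_prime (by omega : i ≠ 1)
  have hle := Nat.le_of_dvd (by omega) (Nat.minFac_dvd i)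
  rcases Nat.lt_or_ge i.minFac i with hlt | hge
  · exact hlt
  · exact absurd (Nat.le_antisymm hle hge ▸ hp) h

theorem sInv_init (n : Nat) : SInv n (Array.replicate (n + 1) 1) 2 := by
  refine ⟨by simp, fun k h2 hk => ?_⟩
  rw [arrGetD_replicate (n + 1) k 1 0 (by omega)]
  exact iff_of_true rfl (Or.inr (Nat.minFac_prime (by omega : k ≠ 1)).two_le)

theorem sInv_step_prime {n : Nat} {arr : Array Nat} {i : Nat} (hInv : SInv n arr i)
    (h2 : 2 ≤ i) (hin : i ≤ n) (h1 : arr.getD i 0 = 1) :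
    Nat.Prime i ∧ SInv n (markMuls i 2 n arr) (i + 1) := by
  obtain ⟨hlen, hiff⟩ := hInv
  have hpri : Nat.Prime i := by
    rcases (hiff i h2 hin).mp h1 with hp | hmf
    · exact hp
    · by_contra hnp
      have := composite_minFac_lt h2 hnp
      omega
  refine ⟨hpri, by rw [markMuls_size]; exact hlen, fun k hk2 hkn => ?_⟩
  rw [markMuls_getD i (by omega) 2 arr (by omega) k]
  by_cases hmark : i ∣ k ∧ i * 2 ≤ k ∧ k ≤ n
  · rw [if_pos hmark]
    apply iff_of_false (by simp)
    rintro (hkp | hmf)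
    · rcases (Nat.Prime.eq_one_or_self_of_dvd hkp i hmark.1) with h | h <;> omega
    · have := Nat.minFac_le_of_dvd h2 hmark.1
      omega
  · rw [if_neg hmark, hiff k hk2 hkn]
    constructor
    · rintro (hkp | hmf)
      · exact Or.inl hkp
      · by_cases hkp : Nat.Prime k
        · exact Or.inl hkp
        · right
          rcases Nat.eq_or_lt_of_le hmf with heq | hlt
          · exfalso
            have hdvd : i ∣ k := heq ▸ Nat.minFac_dvd k
            apply hmark
            obtain ⟨m, rfl⟩ := hdvd
            have hm0 : m ≠ 0 := by rintro rfl; omega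
            have hm1 : m ≠ 1 := by rintro rfl; simp at hk2 hkp ⊢; exact hkp hpri
            exact ⟨dvd_mul_right i m, Nat.mul_le_mul_left i (by omega), hkn⟩
          · omega
    · rintro (hkp | hmf)
      · exact Or.inl hkp
      · exact Or.inr (by omega)

theorem sInv_step_comp {n : Nat} {arr : Array Nat} {i : Nat} (hInv : SInv n arr i)
    (h2 : 2 ≤ i) (hin : i ≤ n) (h1 : arr.getD i 0 ≠ 1) :
    ¬ Nat.Prime i ∧ SInv n arr (i + 1) := by
  obtain ⟨hlen, hiff⟩ := hInv
  have hnp : ¬ (Nat.Prime i ∨ i ≤ Nat.minFac i) := fun hcon => h1 ((hiff i h2 hin).mpr hcon)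
  have hnpi : ¬ Nat.Prime i := fun hp => hnp (Or.inl hp)
  refine ⟨hnpi, hlen, fun k hk2 hkn => ?_⟩
  rw [hiff k hk2 hkn]
  constructor
  · rintro (hkp | hmf)
    · exact Or.inl hkp
    · right
      rcases Nat.eq_or_lt_of_le hmf with heq | hlt
      · exact absurd (heq ▸ Nat.minFac_prime (by omega : k ≠ 1)) hnpi
      · omega
  · rintro (hkp | hmf)
    · exact Or.inl hkp
    · exact Or.inr (by omega)

-- ---- the spec list ----
theorem sListR_of_gt {n i : Nat} (h : n < i) : sListR n i = [] := by
  rw [sListR]; simp [Nat.not_le.mpr h]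

theorem mem_sListR {n i p : Nat} : p ∈ sListR n i ↔ i ≤ p ∧ p ≤ n ∧ Nat.Prime p ∧ p ∣ n := by
  fun_induction sListR n i with
  | case1 i h ih =>
    by_cases hc : Nat.Prime i ∧ i ∣ n
    · rw [if_pos hc]
      simp only [List.singleton_append, List.mem_cons, ih]
      constructor
      · rintro (rfl | ⟨h1, h2, h3, h4⟩)
        · exact ⟨le_refl _, h, hc.1, hc.2⟩
        · exact ⟨by omega, h2, h3, h4⟩
      · rintro ⟨h1, h2, h3, h4⟩
        rcases Nat.eq_or_lt_of_le h1 with rfl | hlt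
        · exact Or.inl rfl
        · exact Or.inr ⟨by omega, h2, h3, h4⟩
    · rw [if_neg hc]
      simp only [List.nil_append, ih]
      constructor
      · rintro ⟨h1, h2, h3, h4⟩; exact ⟨by omega, h2, h3, h4⟩
      · rintro ⟨h1, h2, h3, h4⟩
        rcases Nat.eq_or_lt_of_le h1 with rfl | hlt
        · exact absurd ⟨h3, h4⟩ hc
        · exact ⟨by omega, h2, h3, h4⟩
  | case2 i h =>
    simp only [List.not_mem_nil, false_iff]
    rintro ⟨h1, h2, _, _⟩; omega

theorem sListR_nodup (n i : Nat) : (sListR n i).Nodup := by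
  fun_induction sListR n i with
  | case1 i h ih =>
    by_cases hc : Nat.Prime i ∧ i ∣ n
    · rw [if_pos hc]
      simp only [List.singleton_append, List.nodup_cons]
      exact ⟨fun hm => by have := (mem_sListR.mp hm).1; omega, ih⟩
    · rw [if_neg hc]; simpa using ih
  | case2 i h => exact List.nodup_nil

-- ---- the two sieve loops compute the spec list ----
theorem sieveA_spec (n : Nat) :
    ∀ K i (arr : Array Nat) (ret num : List Nat), n + 1 - i ≤ K → 2 ≤ i → SInv n arr i →
      sieveA (n + 1) i n arr ret num =
        (ret ++ sListR n i, num ++ (sListR n i).map (n.factorization ·)) := by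
  intro K
  induction K with
  | zero =>
    intro i arr ret num hK h2 hInv
    rw [sieveA, dif_neg (by omega), sListR_of_gt (by omega)]
    simp
  | succ K ih =>
    intro i arr ret num hK h2 hInv
    by_cases hiL : i < n + 1
    · rw [sieveA, dif_pos hiL]
      by_cases harr : arr.getD i 0 = 1
      · obtain ⟨hpri, hInv'⟩ := sInv_step_prime hInv h2 (by omega) harr
        rw [if_pos harr]
        by_cases hdvd : n % i = 0
        · rw [if_pos hdvd]
          have hdv : i ∣ n := Nat.dvd_of_mod_eq_zero hdvd
          rw [countLoop_append i hpri n (by omega) num 0]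
          rw [ih (i + 1) _ _ _ (by omega) (by omega) hInv']
          rw [show sListR n i = i :: sListR n (i + 1) by
            rw [sListR, if_pos (show i ≤ n by omega), if_pos ⟨hpri, hdv⟩]; rfl]
          simp
        · rw [if_neg hdvd]
          rw [countLoop_not_dvd n i num hdvd]
          rw [ih (i + 1) _ _ _ (by omega) (by omega) hInv']
          rw [show sListR n i = sListR n (i + 1) by
            rw [sListR, if_pos (show i ≤ n by omega),
              if_neg (fun hc => hdvd (Nat.mod_eq_zero_of_dvd hc.2))]
            simp]
      · rw [if_neg harr]
        obtain ⟨hnpi, hInv'⟩ := sInv_step_comp hInv h2 (by omega) harr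
        rw [ih (i + 1) _ _ _ (by omega) (by omega) hInv']
        rw [show sListR n i = sListR n (i + 1) by
          rw [sListR, if_pos (show i ≤ n by omega), if_neg (fun hc => hnpi hc.1)]
          simp]
    · rw [sieveA, dif_neg hiL, sListR_of_gt (by omega)]
      simp

theorem sieveB_spec (n : Nat) :
    ∀ K i (arr : Array Nat) (ret : List Nat), n + 1 - i ≤ K → 2 ≤ i → SInv n arr i →
      sieveB (n + 1) i n arr ret = ret ++ sListR n i := by
  intro K
  induction K with
  | zero =>
    intro i arr ret hK h2 hInv
    rw [sieveB, dif_neg (by omega), sListR_of_gt (by omega)]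
    simp
  | succ K ih =>
    intro i arr ret hK h2 hInv
    by_cases hiL : i < n + 1
    · rw [sieveB, dif_pos hiL]
      by_cases harr : arr.getD i 0 = 1
      · obtain ⟨hpri, hInv'⟩ := sInv_step_prime hInv h2 (by omega) harr
        rw [if_pos harr]
        by_cases hdvd : n % i = 0
        · rw [if_pos hdvd]
          have hdv : i ∣ n := Nat.dvd_of_mod_eq_zero hdvd
          rw [ih (i + 1) _ _ (by omega) (by omega) hInv']
          rw [show sListR n i = i :: sListR n (i + 1) by
            rw [sListR, if_pos (show i ≤ n by omega), if_pos ⟨hpri, hdv⟩]; rfl]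
          simp
        · rw [if_neg hdvd]
          rw [ih (i + 1) _ _ (by omega) (by omega) hInv']
          rw [show sListR n i = sListR n (i + 1) by
            rw [sListR, if_pos (show i ≤ n by omega),
              if_neg (fun hc => hdvd (Nat.mod_eq_zero_of_dvd hc.2))]
            simp]
      · rw [if_neg harr]
        obtain ⟨hnpi, hInv'⟩ := sInv_step_comp hInv h2 (by omega) harr
        rw [ih (i + 1) _ _ (by omega) (by omega) hInv']
        rw [show sListR n i = sListR n (i + 1) by
          rw [sListR, if_pos (show i ≤ n by omega), if_neg (fun hc => hnpi hc.1)]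
          simp]
    · rw [sieveB, dif_neg hiL, sListR_of_gt (by omega)]
      simp

-- ---- the final product loop ----
theorem foldProd (f : Nat → Nat) (ret2 : List Nat) :
    ∀ (ps pre : List Nat) (acc : Nat),
      (PySem.List.enumerate ps (pre.length : Int)).foldl
          (fun r ip => if ip.2 ∈ ret2 then r else r * ip.2 ^ PySem.List.pyGetD ((pre ++ ps).map f) ip.1 0) acc
        = acc * ((ps.filter (fun p => decide (p ∉ ret2))).map (fun p => p ^ f p)).prod := by
  intro ps
  induction ps with
  | nil =>
    intro pre acc
    rw [PySem.List.enumerate_nil]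
    simp
  | cons p ps ih =>
    intro pre acc
    rw [PySem.List.enumerate_cons, List.foldl_cons]
    have hidx : PySem.List.pyGetD ((pre ++ p :: ps).map f) ((pre.length : Nat) : Int) 0 = f p := by
      rw [PySem.List.pyGetD_natCast, List.map_append, List.getD_eq_getElem?_getD,
        List.getElem?_append_right (by simp)]
      simp
    have hlen1 : ((pre.length : Int) + 1) = (((pre ++ [p]).length : Nat) : Int) := by
      simp
    have harr : pre ++ p :: ps = (pre ++ [p]) ++ ps := by simp
    by_cases hmem : p ∈ ret2
    · have hbody : (if (((pre.length : Nat) : Int), p).2 ∈ ret2 then acc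
          else acc * (((pre.length : Nat) : Int), p).2 ^
            PySem.List.pyGetD ((pre ++ p :: ps).map f) (((pre.length : Nat) : Int), p).1 0) = acc := by
        simp [hmem]
      rw [hbody, hlen1, harr, ih (pre ++ [p]) acc]
      simp [hmem]
    · have hbody : (if (((pre.length : Nat) : Int), p).2 ∈ ret2 then acc
          else acc * (((pre.length : Nat) : Int), p).2 ^
            PySem.List.pyGetD ((pre ++ p :: ps).map f) (((pre.length : Nat) : Int), p).1 0) = acc * p ^ f p := by
        simp only [hmem, if_false]
        rw [hidx]
      rw [hbody, hlen1, harr, ih (pre ++ [p]) (acc * p ^ f p)]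
      simp [hmem, mul_assoc]

theorem filter_sListR_toFinset {a b : Nat} (ha : 1 ≤ a) (hb : 1 ≤ b) :
    ((sListR a 2).filter (fun p => decide (p ∉ sListR b 2))).toFinset =
      a.primeFactors \ b.primeFactors := by
  ext p
  simp only [List.mem_toFinset, List.mem_filter, mem_sListR, Finset.mem_sdiff,
    Nat.mem_primeFactors, decide_eq_true_eq]
  constructor
  · rintro ⟨⟨hp2, hpa, hp, hd⟩, hnb⟩
    refine ⟨⟨hp, hd, by omega⟩, fun hb => ?_⟩
    exact hnb ⟨hp.two_le, Nat.le_of_dvd (by omega) hb.2.1, hp, hb.2.1⟩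
  · rintro ⟨⟨hp, hd, ha0⟩, hnb⟩
    refine ⟨⟨hp.two_le, Nat.le_of_dvd (by omega) hd, hp, hd⟩, fun hc => ?_⟩
    exact hnb ⟨hp, hc.2.2.2, by omega⟩

-- ---- B side ----
theorem gcdW_natCast : ∀ (b a : Nat), gcdW (a : Int) (b : Int) = (Nat.gcd a b : Int) := by
  intro b
  induction b using Nat.strong_induction_on with
  | _ b ih =>
    intro a
    rcases Nat.eq_zero_or_pos b with rfl | hpos
    · rw [gcdW]; simp
    · rw [gcdW, dif_pos (by exact_mod_cast hpos.ne' : (b : Int) ≠ 0)]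
      rw [PySem.Int.mod_natCast]
      rw [ih (a % b) (Nat.mod_lt a hpos) b]
      rw [Nat.gcd_comm b, ← Nat.gcd_rec, Nat.gcd_comm]

theorem coprimePart_div_gcd {a b : Nat} (ha : 1 ≤ a) (hb : 1 ≤ b) :
    coprimePart (a / Nat.gcd a b) b = coprimePart a b := by
  have hg : Nat.gcd a b ∣ a := Nat.gcd_dvd_left a b
  have key : ∀ p, b.factorization p = 0 →
      (a / Nat.gcd a b).factorization p = a.factorization p := by
    intro p hfb
    rw [Nat.factorization_div hg]
    rw [Finsupp.tsub_apply, Nat.factorization_gcd (by omega) (by omega), Finsupp.inf_apply, hfb]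
    simp
  have hsets : (a / Nat.gcd a b).primeFactors \ b.primeFactors =
      a.primeFactors \ b.primeFactors := by
    ext p
    simp only [Finset.mem_sdiff, ← Nat.support_factorization, Finsupp.mem_support_iff]
    constructor
    · rintro ⟨hne, hnb⟩
      have hfb : b.factorization p = 0 := by omega
      rw [key p hfb] at hne
      exact ⟨hne, hnb⟩
    · rintro ⟨hne, hnb⟩
      have hfb : b.factorization p = 0 := by omega
      rw [← key p hfb] at hne
      exact ⟨hne, hnb⟩
  unfold coprimePart
  rw [hsets]
  apply Finset.prod_congr rfl
  intro p hp
  have hfb : b.factorization p = 0 := by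
    have := (Finset.mem_sdiff.mp hp).2
    rw [← Nat.support_factorization, Finsupp.mem_support_iff] at this
    omega
  rw [key p hfb]

theorem coprimePart_of_coprime {a b : Nat} (ha : 1 ≤ a) (h : Nat.gcd a b = 1) :
    coprimePart a b = a := by
  unfold coprimePart
  rw [Finset.sdiff_eq_self_of_disjoint (Nat.Coprime.disjoint_primeFactors h)]
  rw [← Nat.support_factorization]
  exact Nat.prod_factorization_pow_eq_self (by omega : a ≠ 0)

theorem altLoop_spec : ∀ (a : Nat), 1 ≤ a → ∀ (b : Nat), 1 ≤ b →
    altLoop (a : Int) (b : Int) = (coprimePart a b : Int) := by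
  intro a
  induction a using Nat.strong_induction_on with
  | _ a ih =>
    intro ha b hb
    rw [altLoop]
    rw [gcdW_natCast b a]
    have hGpos : 0 < Nat.gcd a b := Nat.gcd_pos_of_pos_right a hb
    by_cases h1 : Nat.gcd a b = 1
    · rw [if_pos (by exact_mod_cast h1)]
      rw [coprimePart_of_coprime ha h1]
    · have hG2 : 2 ≤ Nat.gcd a b := by omega
      have hdvd : Nat.gcd a b ∣ a := Nat.gcd_dvd_left a b
      have hle : Nat.gcd a b ≤ a := Nat.le_of_dvd (by omega) hdvd
      rw [if_neg (by exact_mod_cast h1), dif_pos ⟨by exact_mod_cast hG2, by exact_mod_cast hle⟩]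
      rw [PySem.Int.floordiv_natCast]
      have haG : 1 ≤ a / Nat.gcd a b := Nat.div_pos hle hGpos
      rw [ih (a / Nat.gcd a b) (Nat.div_lt_self (by omega) hG2) haG b hb]
      rw [coprimePart_div_gcd ha hb]

-- ===== VERDICT (by name: the statement is the Claim_ definition above) =====
theorem cpFact_spec : Claim_equal_cpFact := by
  intro A B hDom hPre
  unfold Spec_cpFact
  by_cases hA : A ≤ 1
  · unfold cpFact cpFact_alt
    rw [if_pos hA]
    simp only [Array.size_replicate]
    rw [sieveA, dif_neg (by omega)]
    simp [PySem.List.enumerate_nil]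
  · have hB : 1 ≤ B := hPre.resolve_right hA
    have hAa : A = ((A.toNat : Nat) : Int) := by omega
    have ha2 : 2 ≤ A.toNat := by omega
    have hb1 : 1 ≤ B.toNat := by omega
    have hAl : (A + 1).toNat = A.toNat + 1 := by omega
    have hBl : (B + 1).toNat = B.toNat + 1 := by omega
    unfold cpFact
    simp only [Array.size_replicate, hAl, hBl]
    rw [sieveA_spec A.toNat (A.toNat + 1) 2 _ [] [] (by omega) (by omega) (sInv_init A.toNat)]
    rw [sieveB_spec B.toNat (B.toNat + 1) 2 _ [] (by omega) (by omega) (sInv_init B.toNat)]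
    simp only [List.nil_append]
    have hf := foldProd (Nat.factorization A.toNat ·) (sListR B.toNat 2) (sListR A.toNat 2) [] 1
    simp only [List.length_nil, Nat.cast_zero, List.nil_append, one_mul] at hf
    rw [hf]
    rw [← List.prod_toFinset _ ((sListR_nodup A.toNat 2).filter _)]
    rw [filter_sListR_toFinset (by omega) hb1]
    have halt : cpFact_alt A B = ((coprimePart A.toNat B.toNat : Nat) : Int) := by
      unfold cpFact_alt
      rw [if_neg hA, if_neg (by omega : ¬ B < 0)]
      rw [show A = ((A.toNat : Nat) : Int) by omega, show B = ((B.toNat : Nat) : Int) by omega]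
      exact altLoop_spec A.toNat (by omega) B.toNat hb1
    rw [halt]
    rfl
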